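-- pv_equiv track=rewrite | github.com/Myrvixen/AoC2024 | AoC2024/Day7/day7.py | DFS
-- ===== SOURCE A (Python) =====
-- def DFS(numbers, target, operation='+', total=0, part2=False):
--
--     if total > target:
--         return False
--
--     if len(numbers) == 0:
--         return total == target
--
--     if operation == '+':
--         new_total = total + numbers[0]
--     elif operation == '*':
--         new_total = total * numbers[0]
--     elif operation == '||' and part2:
--         new_total = int(str(total) + str(numbers[0]))
--     else:
--         raise ValueError(f"Wrong operation: '{operation}'")
--
--     ops = ['+', '*'] + ['||']*part2
--     for op in ops:
--         if DFS(numbers[1:], target, op, new_total, part2):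
--             return True
--     return False
-- ===== SOURCE B (Python) =====
-- def DFS(numbers, target, operation='+', total=0, part2=False):
--     if total > target:
--         return False
--     if len(numbers) == 0:
--         return total == target
--     if operation == '+':
--         start = total + numbers[0]
--     elif operation == '*':
--         start = total * numbers[0]
--     elif operation == '||' and part2:
--         c = _concat(total, numbers[0])
--         if c is None:
--             return False
--         start = c
--     else:
--         raise ValueError(f"Wrong operation: '{operation}'")
--     frontier = {start}
--     for n in numbers[1:]:
--         nxt = set()
--         for v in frontier:
--             if v > target:
--                 continue
--             nxt.add(v + n)
--             nxt.add(v * n)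
--             if part2:
--                 c = _concat(v, n)
--                 if c is not None:
--                     nxt.add(c)
--         frontier = nxt
--     return target in frontier
--
--
-- def _concat(v, n):
--     # concatenation only makes sense for a nonnegative right operand (digits)
--     if n < 0:
--         return None
--     return int(str(v) + str(n))
-- ===== Notes on version B (the rewrite author's own statement) =====
-- stated objective: alternative
-- what changed: Replaces A's exponential recursion over all operator sequences by a single left-to-right pass keeping the deduplicated SET of reachable intermediate totals per position (same total>target pruning before each expansion, concatenation applied only to a nonnegative next number so it is always well-formed), ending with a membership test of target.
-- outside the precondition, e.g. on DFS([-3, -3, -1], 6, '+', 0, True): A returns True, B returns True; on DFS([-2, -2], -2, '*', -2, True): A returns False, B returns False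
import Mathlib
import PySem

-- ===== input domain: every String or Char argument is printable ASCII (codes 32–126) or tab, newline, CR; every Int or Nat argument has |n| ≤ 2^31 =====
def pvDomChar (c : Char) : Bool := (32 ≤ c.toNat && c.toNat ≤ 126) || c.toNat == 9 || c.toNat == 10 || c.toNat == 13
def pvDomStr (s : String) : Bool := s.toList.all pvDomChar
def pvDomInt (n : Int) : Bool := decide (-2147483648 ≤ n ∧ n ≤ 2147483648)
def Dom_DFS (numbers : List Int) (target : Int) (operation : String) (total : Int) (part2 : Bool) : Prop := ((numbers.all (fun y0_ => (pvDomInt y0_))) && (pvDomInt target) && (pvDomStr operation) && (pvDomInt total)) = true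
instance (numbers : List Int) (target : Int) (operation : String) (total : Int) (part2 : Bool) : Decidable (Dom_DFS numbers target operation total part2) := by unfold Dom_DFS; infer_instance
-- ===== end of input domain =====

-- B replaces A's exponential recursion over operator sequences by one forward pass keeping the
-- deduplicated SET of reachable totals per position (same pruning, concat only for a nonnegative
-- right operand); equivalence is about the return value only (neither program mutates arguments).

-- ===== PORT A =====
-- int(str(v) + str(n)): the parse fails (Python raises ValueError) exactly when str(n) starts
-- with '-'; Pre_DFS keeps every reachable concatenation nonnegative, so the default 0 is never
-- observed on Pre_.
def pvConcat (v n : Int) : Int :=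
  (PySem.Int.ofStr? (PySem.Int.toStr v ++ PySem.Int.toStr n)).getD 0

def DFS : (numbers : List Int) → (target : Int) → (operation : String) → (total : Int) → (part2 : Bool) → Bool
  | numbers, target, operation, total, part2 =>
    if total > target then false
    else
      match numbers with
      | [] => decide (total = target)
      | n :: rest =>
        -- new_total; none = the `raise ValueError` branch (excluded by Pre_DFS)
        let newOpt : Option Int :=
          if operation = "+" then some (total + n)
          else if operation = "*" then some (total * n)
          else if operation = "||" ∧ part2 = true then some (pvConcat total n)
          else none
        match newOpt with
        | none => false
        | some new_total =>
          (["+", "*"] ++ if part2 then ["||"] else []).any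
            (fun op => DFS rest target op new_total part2)
  termination_by numbers _ _ _ _ => numbers.length
  decreasing_by simp

-- ===== PORT B =====
-- _concat from Source B: none exactly when the right operand is negative
def pvConcat? (v n : Int) : Option Int :=
  if n < 0 then none else some (pvConcat v n)

-- one step of Source B's loop: expand the frontier set by the next number (skipping pruned totals)
def pvExpand (target : Int) (part2 : Bool) (frontier : PySem.Set Int) (n : Int) : PySem.Set Int :=
  frontier.foldl
    (fun acc v =>
      if v > target then acc
      else
        let acc1 := PySem.Set.add acc (v + n)
        let acc2 := PySem.Set.add acc1 (v * n)
        if part2 then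
          match pvConcat? v n with
          | some c => PySem.Set.add acc2 c
          | none => acc2
        else acc2)
    PySem.Set.empty

def DFS_alt (numbers : List Int) (target : Int) (operation : String) (total : Int) (part2 : Bool) : Bool :=
  if total > target then false
  else
    match numbers with
    | [] => decide (total = target)
    | n :: rest =>
      -- start; none covers both Source B's `raise ValueError` (invalid operation, excluded by
      -- Pre_DFS) and its `return False` when the initial concatenation is undefined
      let startOpt : Option Int :=
        if operation = "+" then some (total + n)
        else if operation = "*" then some (total * n)
        else if operation = "||" ∧ part2 = true then pvConcat? total n
        else none
      match startOpt with
      | none => false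
      | some v0 =>
        PySem.Set.contains (rest.foldl (pvExpand target part2) (PySem.Set.ofList [v0])) target

-- ===== PRECONDITION & SPEC =====
-- Pre_DFS excludes the inputs on which Python A can raise ValueError: an invalid operation
-- reached, or a part2 concatenation applied to a negative number. It is conservative: on
-- excluded inputs where pruning keeps A from ever reaching the failing concatenation, A still
-- returns — and B returns the same value there (see the cites in the header).
def Pre_DFS (numbers : List Int) (target : Int) (operation : String) (total : Int) (part2 : Bool) : Prop :=
  (total ≤ target ∧ numbers ≠ []) →
    ((operation = "+" ∨ operation = "*" ∨ (operation = "||" ∧ part2 = true)) ∧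
     (part2 = true → (∀ n ∈ numbers.drop 1, 0 ≤ n) ∧
        (operation = "||" → ∀ n ∈ numbers.take 1, 0 ≤ n)))
instance (numbers : List Int) (target : Int) (operation : String) (total : Int) (part2 : Bool) : Decidable (Pre_DFS numbers target operation total part2) := by unfold Pre_DFS; infer_instance

def pvWitness_DFS : List Int × Int × String × Int × Bool := ([2, 3, 4], 20, "+", 0, true)

def Spec_DFS (numbers : List Int) (target : Int) (operation : String) (total : Int) (part2 : Bool) (out : Bool) : Prop := out = DFS_alt numbers target operation total part2
instance (numbers : List Int) (target : Int) (operation : String) (total : Int) (part2 : Bool) (out : Bool) : Decidable (Spec_DFS numbers target operation total part2 out) := by unfold Spec_DFS; infer_instance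

-- ===== CLAIM (what is proved, stated in full; the proofs are below) =====
def Claim_equal_DFS : Prop := ∀ (numbers : List Int) (target : Int) (operation : String) (total : Int) (part2 : Bool), Dom_DFS numbers target operation total part2 → Pre_DFS numbers target operation total part2 → Spec_DFS numbers target operation total part2 (DFS numbers target operation total part2)

-- ===== LEMMAS AND PROOFS =====

-- the disjunction A's op-loop computes from a given intermediate total v
def pvH (rest : List Int) (target : Int) (v : Int) (part2 : Bool) : Bool :=
  (["+", "*"] ++ if part2 then ["||"] else []).any (fun op => DFS rest target op v part2)

theorem pvDFS_nil (t : Int) (op : String) (v : Int) (p2 : Bool) :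
    DFS [] t op v p2 = decide (v = t) := by
  rw [DFS.eq_def]
  by_cases h : v > t
  · simp [h]; omega
  · simp [h]

theorem pvH_nil (t v : Int) (p2 : Bool) : pvH [] t v p2 = decide (v = t) := by
  cases p2 <;> simp [pvH, pvDFS_nil]

theorem pvDFS_cons (m : Int) (rest : List Int) (t : Int) (op : String) (v : Int) (p2 : Bool) :
    DFS (m :: rest) t op v p2 =
      if v > t then false
      else
        match (if op = "+" then some (v + m)
               else if op = "*" then some (v * m)
               else if op = "||" ∧ p2 = true then some (pvConcat v m)
               else none) with
        | none => false
        | some new_total => pvH rest t new_total p2 := by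
  rw [DFS.eq_def]
  rfl

theorem pvH_cons (m : Int) (rest : List Int) (t v : Int) (p2 : Bool) :
    pvH (m :: rest) t v p2 =
      if t < v then false
      else (pvH rest t (v + m) p2 || pvH rest t (v * m) p2 ||
            (p2 && pvH rest t (pvConcat v m) p2)) := by
  unfold pvH
  simp only [pvDFS_cons]
  by_cases h : v > t
  · simp [h]
  · have h' : ¬ t < v := by omega
    cases p2 <;> simp [h, pvH, Bool.or_assoc]

theorem pvMem_expand (t : Int) (p2 : Bool) (m x : Int) (fr : List Int) :
    x ∈ pvExpand t p2 fr m ↔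
      ∃ v ∈ fr, v ≤ t ∧
        (x = v + m ∨ x = v * m ∨ (p2 = true ∧ 0 ≤ m ∧ x = pvConcat v m)) := by
  have step : ∀ (l : List Int) (acc : PySem.Set Int),
      x ∈ l.foldl
        (fun acc v =>
          if v > t then acc
          else
            let acc1 := PySem.Set.add acc (v + m)
            let acc2 := PySem.Set.add acc1 (v * m)
            if p2 then
              match pvConcat? v m with
              | some c => PySem.Set.add acc2 c
              | none => acc2
            else acc2) acc ↔
      x ∈ acc ∨ ∃ v ∈ l, v ≤ t ∧
        (x = v + m ∨ x = v * m ∨ (p2 = true ∧ 0 ≤ m ∧ x = pvConcat v m)) := by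
    intro l
    induction l with
    | nil => simp
    | cons a l ih =>
      intro acc
      simp only [List.foldl_cons]
      rw [ih]
      by_cases ha : a > t
      · have ha' : ¬ a ≤ t := by omega
        simp only [if_pos ha, List.mem_cons]
        constructor
        · rintro (h | ⟨v, hv, rest⟩)
          · exact Or.inl h
          · exact Or.inr ⟨v, Or.inr hv, rest⟩
        · rintro (h | ⟨v, (rfl | hv), rest⟩)
          · exact Or.inl h
          · exact absurd rest.1 ha'
          · exact Or.inr ⟨v, hv, rest⟩
      · have ha' : a ≤ t := by omega
        by_cases hm : m < 0
        · have hm' : ¬ 0 ≤ m := by omega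
          have hcn : pvConcat? a m = none := by simp [pvConcat?, hm]
          cases p2
          · simp only [if_neg ha, Bool.false_eq_true, if_false, false_and, or_false,
              PySem.Set.mem_add, List.mem_cons]
            constructor
            · rintro (((h | h) | h) | ⟨v, hv, rest⟩)
              · exact Or.inl h
              · exact Or.inr ⟨a, Or.inl rfl, ha', Or.inl h⟩
              · exact Or.inr ⟨a, Or.inl rfl, ha', Or.inr h⟩
              · exact Or.inr ⟨v, Or.inr hv, rest⟩
            · rintro (h | ⟨v, (rfl | hv), hle, (h | h)⟩)
              · exact Or.inl (Or.inl (Or.inl h))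
              · exact Or.inl (Or.inl (Or.inr h))
              · exact Or.inl (Or.inr h)
              · exact Or.inr ⟨v, hv, hle, Or.inl h⟩
              · exact Or.inr ⟨v, hv, hle, Or.inr h⟩
          · simp only [if_neg ha, if_true, hcn, hm', false_and, and_false, or_false,
              PySem.Set.mem_add, List.mem_cons]
            constructor
            · rintro (((h | h) | h) | ⟨v, hv, rest⟩)
              · exact Or.inl h
              · exact Or.inr ⟨a, Or.inl rfl, ha', Or.inl h⟩
              · exact Or.inr ⟨a, Or.inl rfl, ha', Or.inr h⟩
              · exact Or.inr ⟨v, Or.inr hv, rest⟩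
            · rintro (h | ⟨v, (rfl | hv), hle, (h | h)⟩)
              · exact Or.inl (Or.inl (Or.inl h))
              · exact Or.inl (Or.inl (Or.inr h))
              · exact Or.inl (Or.inr h)
              · exact Or.inr ⟨v, hv, hle, Or.inl h⟩
              · exact Or.inr ⟨v, hv, hle, Or.inr h⟩
        · have hm' : 0 ≤ m := by omega
          have hcs : ∀ v, pvConcat? v m = some (pvConcat v m) := by
            intro v; simp [pvConcat?, hm]
          cases p2
          · simp only [if_neg ha, Bool.false_eq_true, if_false, false_and, or_false,
              PySem.Set.mem_add, List.mem_cons]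
            constructor
            · rintro (((h | h) | h) | ⟨v, hv, rest⟩)
              · exact Or.inl h
              · exact Or.inr ⟨a, Or.inl rfl, ha', Or.inl h⟩
              · exact Or.inr ⟨a, Or.inl rfl, ha', Or.inr h⟩
              · exact Or.inr ⟨v, Or.inr hv, rest⟩
            · rintro (h | ⟨v, (rfl | hv), hle, (h | h)⟩)
              · exact Or.inl (Or.inl (Or.inl h))
              · exact Or.inl (Or.inl (Or.inr h))
              · exact Or.inl (Or.inr h)
              · exact Or.inr ⟨v, hv, hle, Or.inl h⟩
              · exact Or.inr ⟨v, hv, hle, Or.inr h⟩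
          · simp only [if_neg ha, if_true, hcs, PySem.Set.mem_add, List.mem_cons]
            constructor
            · rintro ((((h | h) | h) | h) | ⟨v, hv, rest⟩)
              · exact Or.inl h
              · exact Or.inr ⟨a, Or.inl rfl, ha', Or.inl h⟩
              · exact Or.inr ⟨a, Or.inl rfl, ha', Or.inr (Or.inl h)⟩
              · exact Or.inr ⟨a, Or.inl rfl, ha', Or.inr (Or.inr ⟨trivial, hm', h⟩)⟩
              · exact Or.inr ⟨v, Or.inr hv, rest⟩
            · rintro (h | ⟨v, (rfl | hv), hle, (h | h | ⟨-, -, h⟩)⟩)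
              · exact Or.inl (Or.inl (Or.inl (Or.inl h)))
              · exact Or.inl (Or.inl (Or.inl (Or.inr h)))
              · exact Or.inl (Or.inl (Or.inr h))
              · exact Or.inl (Or.inr h)
              · exact Or.inr ⟨v, hv, hle, Or.inl h⟩
              · exact Or.inr ⟨v, hv, hle, Or.inr (Or.inl h)⟩
              · exact Or.inr ⟨v, hv, hle, Or.inr (Or.inr ⟨trivial, hm', h⟩)⟩
  unfold pvExpand
  rw [step]
  simp [PySem.Set.empty]

theorem pvContains_fold (t : Int) (p2 : Bool) :
    ∀ (rest : List Int) (fr : List Int),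
      (p2 = true → ∀ m ∈ rest, 0 ≤ m) →
      (PySem.Set.contains (rest.foldl (pvExpand t p2) fr) t = true ↔
        ∃ v ∈ fr, pvH rest t v p2 = true) := by
  intro rest
  induction rest with
  | nil =>
    intro fr _
    simp [pvH_nil]
  | cons m rs ih =>
    intro fr hpos
    have hpos' : p2 = true → ∀ k ∈ rs, 0 ≤ k := fun hp k hk => hpos hp k (List.mem_cons_of_mem _ hk)
    simp only [List.foldl_cons]
    rw [ih _ hpos']
    constructor
    · rintro ⟨v, hv, hH⟩
      rw [pvMem_expand] at hv
      obtain ⟨w, hw, hlt, hcase⟩ := hv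
      refine ⟨w, hw, ?_⟩
      rw [pvH_cons]
      simp only [if_neg (by omega : ¬ t < w)]
      rcases hcase with h | h | ⟨hp2, -, h⟩
      · subst h; simp_all
      · subst h; simp_all
      · subst h; subst hp2; simp_all
    · rintro ⟨w, hw, hH⟩
      rw [pvH_cons] at hH
      by_cases hlt : t < w
      · simp [hlt] at hH
      · have hle : w ≤ t := by omega
        simp only [if_neg hlt, Bool.or_eq_true, Bool.and_eq_true] at hH
        rcases hH with (h | h) | ⟨hp2, h⟩
        · exact ⟨w + m, by rw [pvMem_expand]; exact ⟨w, hw, hle, Or.inl rfl⟩, h⟩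
        · exact ⟨w * m, by rw [pvMem_expand]; exact ⟨w, hw, hle, Or.inr (Or.inl rfl)⟩, h⟩
        · have hmem : pvConcat w m ∈ pvExpand t p2 fr m := by
            rw [pvMem_expand]
            exact ⟨w, hw, hle, Or.inr (Or.inr ⟨hp2, hpos hp2 m List.mem_cons_self, rfl⟩)⟩
          exact ⟨pvConcat w m, hmem, h⟩

-- ===== VERDICT (by name: the statement is the Claim_ definition above) =====
theorem DFS_spec : Claim_equal_DFS := by
  intro numbers target operation total part2 _dom pre
  unfold Spec_DFS
  cases numbers with
  | nil =>
    rw [pvDFS_nil]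
    unfold DFS_alt
    by_cases hp : total > target
    · simp [hp]; omega
    · simp [hp]
  | cons n rest =>
    rw [pvDFS_cons]
    unfold DFS_alt
    by_cases hp : total > target
    · simp [hp]
    · simp only [if_neg hp]
      have hle : total ≤ target := by omega
      obtain ⟨hop, hp2cond⟩ := pre ⟨hle, by simp⟩
      have htail : part2 = true → ∀ m ∈ rest, 0 ≤ m := by
        intro hp2 m hm
        exact (hp2cond hp2).1 m (by simpa using hm)
      -- A's newOpt and B's startOpt agree under Pre_
      have hsame :
          (if operation = "+" then some (total + n)
           else if operation = "*" then some (total * n)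
           else if operation = "||" ∧ part2 = true then some (pvConcat total n)
           else none) =
          (if operation = "+" then some (total + n)
           else if operation = "*" then some (total * n)
           else if operation = "||" ∧ part2 = true then pvConcat? total n
           else none) := by
        rcases hop with h | h | ⟨h, hp2⟩
        · simp [h]
        · simp [h]
        · have hhead : (0:Int) ≤ n := by
            have := ((hp2cond hp2).2 h) n
            simpa using this
          by_cases h1 : operation = "+"
          · simp [h1]
          · by_cases h2 : operation = "*"
            · simp [h2]
            · simp [h, hp2, pvConcat?, show ¬ n < 0 by omega]
      rw [hsame]
      cases hv : (if operation = "+" then some (total + n)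
           else if operation = "*" then some (total * n)
           else if operation = "||" ∧ part2 = true then pvConcat? total n
           else none) with
      | none => rfl
      | some v0 =>
        show pvH rest target v0 part2 =
          (List.foldl (pvExpand target part2) (PySem.Set.ofList [v0]) rest).contains target
        have hB := pvContains_fold target part2 rest (PySem.Set.ofList [v0]) htail
        cases hcb : PySem.Set.contains (rest.foldl (pvExpand target part2) (PySem.Set.ofList [v0])) target with
        | false =>
          cases hH : pvH rest target v0 part2 with
          | false => rfl
          | true =>
            exfalso
            have hc : PySem.Set.contains (rest.foldl (pvExpand target part2) (PySem.Set.ofList [v0])) target = true := by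
              rw [hB]; exact ⟨v0, by simp [PySem.Set.mem_ofList], hH⟩
            rw [hcb] at hc; exact Bool.false_ne_true hc
        | true =>
          obtain ⟨v, hv1, hv2⟩ := hB.mp hcb
          have hvv : v = v0 := by simpa [PySem.Set.mem_ofList] using hv1
          subst hvv
          simp only [hv2]
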